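-- pv_equiv track=rewrite | github.com/burhansvural/SeydappAI_ModelTrainer | src/ui/ai_chat_interface.py | _is_programming_question
-- ===== SOURCE A (Python) =====
-- def _is_programming_question(message: str) -> bool:
--     """Check if the message is a programming-related question"""
--     programming_keywords = [
--         'java', 'android', 'listview', 'layout', 'xml', 'programming', 'code',
--         'python', 'javascript', 'html', 'css', 'react', 'vue', 'angular',
--         'flutter', 'kotlin', 'swift', 'c++', 'c#', 'php', 'ruby', 'go',
--         'algorithm', 'data structure', 'database', 'sql', 'api', 'framework'
--     ]
--
--     message_lower = message.lower()
--     return any(keyword in message_lower for keyword in programming_keywords)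
-- ===== SOURCE B (Python) =====
-- def _is_programming_question(message: str) -> bool:
--     """Check if the message is a programming-related question"""
--     programming_keywords = [
--         'java', 'android', 'listview', 'layout', 'xml', 'programming', 'code',
--         'python', 'javascript', 'html', 'css', 'react', 'vue', 'angular',
--         'flutter', 'kotlin', 'swift', 'c++', 'c#', 'php', 'ruby', 'go',
--         'algorithm', 'data structure', 'database', 'sql', 'api', 'framework'
--     ]
--
--     # index the keywords once by their first character, then make a single
--     # left-to-right pass over the message, probing at each position only the
--     # keywords that can start there
--     index = {}
--     for kw in programming_keywords:
--         index.setdefault(kw[0], []).append(kw)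
--
--     m = message.lower()
--     for i in range(len(m)):
--         if any(m.startswith(kw, i) for kw in index.get(m[i], [])):
--             return True
--     return False
-- ===== Notes on version B (the rewrite author's own statement) =====
-- stated objective: alternative
-- what changed: Instead of running 28 independent keyword-major substring searches over the message, B builds a first-character index of the keywords once and makes a single position-major left-to-right pass over the lowercased message, probing at each position only the keywords whose first letter matches there.
import Mathlib
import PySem

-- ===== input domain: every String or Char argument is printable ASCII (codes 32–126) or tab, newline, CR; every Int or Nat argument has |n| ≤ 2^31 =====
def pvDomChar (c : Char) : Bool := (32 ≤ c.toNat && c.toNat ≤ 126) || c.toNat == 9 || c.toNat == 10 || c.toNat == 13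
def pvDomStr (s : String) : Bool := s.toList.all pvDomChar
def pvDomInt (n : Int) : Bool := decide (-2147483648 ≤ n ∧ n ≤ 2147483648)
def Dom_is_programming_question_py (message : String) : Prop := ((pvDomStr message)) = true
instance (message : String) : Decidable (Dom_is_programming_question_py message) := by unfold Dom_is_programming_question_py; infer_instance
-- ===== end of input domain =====

-- B replaces A's 28 independent substring searches by one first-character index and a single
-- left-to-right scan of the message (objective: alternative; same results, proved below).

-- ===== PORT A =====
def pvKeywordsA : List String := ["java", "android", "listview", "layout", "xml", "programming", "code", "python", "javascript", "html", "css", "react", "vue", "angular", "flutter", "kotlin", "swift", "c++", "c#", "php", "ruby", "go", "algorithm", "data structure", "database", "sql", "api", "framework"]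

def is_programming_question_py (message : String) : Bool :=
  let message_lower := PySem.Str.lower message
  pvKeywordsA.any (fun keyword => PySem.Str.isIn keyword message_lower)

-- ===== PORT B =====
def pvKeywordsB : List String := ["java", "android", "listview", "layout", "xml", "programming", "code", "python", "javascript", "html", "css", "react", "vue", "angular", "flutter", "kotlin", "swift", "c++", "c#", "php", "ruby", "go", "algorithm", "data structure", "database", "sql", "api", "framework"]

-- index.setdefault(kw[0], []).append(kw); kw[0] is kw.toList.headD ' ' (exact: every keyword is nonempty)
def pvIndexB : PySem.Dict Char (List String) :=
  pvKeywordsB.foldl (fun index kw => index.modify (kw.toList.headD ' ') [] (fun l => l ++ [kw])) PySem.Dict.empty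

-- the 'for i in range(len(m))' loop, as structural recursion over the remaining suffix m[i:]
-- (c = m[i]; m.startswith(kw, i) is exact as startswith on the suffix since 0 <= i < len(m))
def pvScanB (index : PySem.Dict Char (List String)) : List Char → Bool
  | [] => false
  | c :: rest =>
    if (index.getD c []).any (fun kw => PySem.Chars.startswith (c :: rest) kw.toList) then true
    else pvScanB index rest

def is_programming_question_py_alt (message : String) : Bool :=
  pvScanB pvIndexB (PySem.Str.lower message).toList

-- ===== PRECONDITION & SPEC =====
def Spec_is_programming_question_py (message : String) (out : Bool) : Prop := out = is_programming_question_py_alt message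
instance (message : String) (out : Bool) : Decidable (Spec_is_programming_question_py message out) := by unfold Spec_is_programming_question_py; infer_instance

-- ===== CLAIM (what is proved, stated in full; the proofs are below) =====
def Claim_equal_is_programming_question_py : Prop := ∀ (message : String), Dom_is_programming_question_py message → Spec_is_programming_question_py message (is_programming_question_py message)

-- ===== LEMMAS AND PROOFS =====

-- at one position, probing the keywords indexed under the first character equals probing all keywords
set_option maxHeartbeats 4000000 in
theorem pv_perpos (c : Char) (rest : List Char) :
    (pvIndexB.getD c []).any (fun kw => PySem.Chars.startswith (c :: rest) kw.toList)
    = pvKeywordsA.any (fun kw => PySem.Chars.startswith (c :: rest) kw.toList) := by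
  by_cases hj : c = 'j'
  · subst hj; simp [pvIndexB, pvKeywordsB, pvKeywordsA, PySem.Dict.getD, PySem.Dict.get?, PySem.Dict.modify, PySem.Dict.insert, PySem.Dict.empty, PySem.Chars.startswith, List.isPrefixOf]
  by_cases ha : c = 'a'
  · subst ha; simp [pvIndexB, pvKeywordsB, pvKeywordsA, PySem.Dict.getD, PySem.Dict.get?, PySem.Dict.modify, PySem.Dict.insert, PySem.Dict.empty, PySem.Chars.startswith, List.isPrefixOf]
  by_cases hl : c = 'l'
  · subst hl; simp [pvIndexB, pvKeywordsB, pvKeywordsA, PySem.Dict.getD, PySem.Dict.get?, PySem.Dict.modify, PySem.Dict.insert, PySem.Dict.empty, PySem.Chars.startswith, List.isPrefixOf]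
  by_cases hx : c = 'x'
  · subst hx; simp [pvIndexB, pvKeywordsB, pvKeywordsA, PySem.Dict.getD, PySem.Dict.get?, PySem.Dict.modify, PySem.Dict.insert, PySem.Dict.empty, PySem.Chars.startswith, List.isPrefixOf]
  by_cases hp : c = 'p'
  · subst hp; simp [pvIndexB, pvKeywordsB, pvKeywordsA, PySem.Dict.getD, PySem.Dict.get?, PySem.Dict.modify, PySem.Dict.insert, PySem.Dict.empty, PySem.Chars.startswith, List.isPrefixOf]
  by_cases hc : c = 'c'
  · subst hc; simp [pvIndexB, pvKeywordsB, pvKeywordsA, PySem.Dict.getD, PySem.Dict.get?, PySem.Dict.modify, PySem.Dict.insert, PySem.Dict.empty, PySem.Chars.startswith, List.isPrefixOf]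
  by_cases hh : c = 'h'
  · subst hh; simp [pvIndexB, pvKeywordsB, pvKeywordsA, PySem.Dict.getD, PySem.Dict.get?, PySem.Dict.modify, PySem.Dict.insert, PySem.Dict.empty, PySem.Chars.startswith, List.isPrefixOf]
  by_cases hr : c = 'r'
  · subst hr; simp [pvIndexB, pvKeywordsB, pvKeywordsA, PySem.Dict.getD, PySem.Dict.get?, PySem.Dict.modify, PySem.Dict.insert, PySem.Dict.empty, PySem.Chars.startswith, List.isPrefixOf]
  by_cases hv : c = 'v'
  · subst hv; simp [pvIndexB, pvKeywordsB, pvKeywordsA, PySem.Dict.getD, PySem.Dict.get?, PySem.Dict.modify, PySem.Dict.insert, PySem.Dict.empty, PySem.Chars.startswith, List.isPrefixOf]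
  by_cases hf : c = 'f'
  · subst hf; simp [pvIndexB, pvKeywordsB, pvKeywordsA, PySem.Dict.getD, PySem.Dict.get?, PySem.Dict.modify, PySem.Dict.insert, PySem.Dict.empty, PySem.Chars.startswith, List.isPrefixOf]
  by_cases hk : c = 'k'
  · subst hk; simp [pvIndexB, pvKeywordsB, pvKeywordsA, PySem.Dict.getD, PySem.Dict.get?, PySem.Dict.modify, PySem.Dict.insert, PySem.Dict.empty, PySem.Chars.startswith, List.isPrefixOf]
  by_cases hs : c = 's'
  · subst hs; simp [pvIndexB, pvKeywordsB, pvKeywordsA, PySem.Dict.getD, PySem.Dict.get?, PySem.Dict.modify, PySem.Dict.insert, PySem.Dict.empty, PySem.Chars.startswith, List.isPrefixOf]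
  by_cases hg : c = 'g'
  · subst hg; simp [pvIndexB, pvKeywordsB, pvKeywordsA, PySem.Dict.getD, PySem.Dict.get?, PySem.Dict.modify, PySem.Dict.insert, PySem.Dict.empty, PySem.Chars.startswith, List.isPrefixOf]
  by_cases hd : c = 'd'
  · subst hd; simp [pvIndexB, pvKeywordsB, pvKeywordsA, PySem.Dict.getD, PySem.Dict.get?, PySem.Dict.modify, PySem.Dict.insert, PySem.Dict.empty, PySem.Chars.startswith, List.isPrefixOf]
  simp [pvIndexB, pvKeywordsB, pvKeywordsA, PySem.Dict.getD, PySem.Dict.get?, PySem.Dict.modify, PySem.Dict.insert, PySem.Dict.empty, PySem.Chars.startswith, List.isPrefixOf, hj, ha, hl, hx, hp, hc, hh, hr, hv, hf, hk, hs, hg, hd, Ne.symm, beq_iff_eq]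

theorem pv_scan_eq (l : List Char) :
    pvScanB pvIndexB l = pvKeywordsA.any (fun k => decide (k.toList <:+: l)) := by
  induction l with
  | nil => decide
  | cons c rest ih =>
    rw [pvScanB, pv_perpos, ih]
    rw [Bool.eq_iff_iff]
    simp only [Bool.ite_eq_true_distrib, if_true_left, List.any_eq_true,
      PySem.Chars.startswith_iff, decide_eq_true_eq, List.infix_cons_iff]
    constructor
    · intro h
      by_cases hp : ∃ x ∈ pvKeywordsA, x.toList <+: c :: rest
      · obtain ⟨x, hx, hpfx⟩ := hp; exact ⟨x, hx, Or.inl hpfx⟩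
      · obtain ⟨x, hx, hin⟩ := h hp; exact ⟨x, hx, Or.inr hin⟩
    · rintro ⟨x, hx, h | h⟩ hnp
      · exact absurd ⟨x, hx, h⟩ hnp
      · exact ⟨x, hx, h⟩

theorem pv_A_eq (message : String) :
    is_programming_question_py message
    = pvKeywordsA.any (fun k => decide (k.toList <:+: (PySem.Str.lower message).toList)) := by
  rw [is_programming_question_py, Bool.eq_iff_iff]
  simp only [List.any_eq_true, PySem.Str.isIn_iff_infix, decide_eq_true_eq]

-- ===== VERDICT (by name: the statement is the Claim_ definition above) =====
theorem is_programming_question_py_spec : Claim_equal_is_programming_question_py := by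
  intro message _
  unfold Spec_is_programming_question_py is_programming_question_py_alt
  rw [pv_scan_eq, pv_A_eq]
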